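-- pv_equiv track=rewrite | github.com/pypi-data/pypi-mirror-247 | packages/SciBatt/scibatt-0.0.1.tar.gz/scibatt-0.0.1/scibatt/filters/cycling.py | select_halfcycles
-- ===== SOURCE A (Python) =====
-- def select_halfcycles(data, number, select_range=None):
--     """
--     Returns input data with only the selected halfcycle numbers.
--     number can be integer og list of integers.
--     Range is a tuple of integers, or list of tuples of integers.
--     """
--
--     selected = {}
--     halfcycles_to_catch = []
--     if isinstance(number, int):
--         halfcycles_to_catch.append(number)
--     elif isinstance(number, list):
--         for num in number:
--             if num not in halfcycles_to_catch:
--                 halfcycles_to_catch.append(num)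
--
--     if isinstance(select_range, tuple):
--         for num in range(
--             select_range[0], select_range[1] + 1
--         ):  # Including last element
--             if num not in halfcycles_to_catch:
--                 halfcycles_to_catch.append(num)
--     elif isinstance(select_range, list):
--         for selected_range in select_range:
--             for num in range(
--                 selected_range[0], selected_range[1] + 1
--             ):  # Including last element
--                 if num not in halfcycles_to_catch:
--                     halfcycles_to_catch.append(num)
--
--     for i, (key, value) in enumerate(data.items()):
--         if i + 1 in halfcycles_to_catch:
--             selected[key] = value
--     return selected
-- ===== SOURCE B (Python) =====
-- def select_halfcycles(data, number, select_range=None):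
--     # Collect wanted halfcycle numbers in a set (no O(k) membership scans),
--     # then pick rows by direct 1-based indexing into the item list, in
--     # ascending position order (= data insertion order).
--     catch = set()
--     if isinstance(number, int):
--         catch.add(number)
--     elif isinstance(number, list):
--         catch.update(number)
--     if isinstance(select_range, tuple):
--         catch.update(range(select_range[0], select_range[1] + 1))
--     elif isinstance(select_range, list):
--         for r in select_range:
--             catch.update(range(r[0], r[1] + 1))
--     items = list(data.items())
--     n = len(items)
--     wanted = sorted(i for i in catch if 1 <= i <= n)
--     return {items[i - 1][0]: items[i - 1][1] for i in wanted}
-- ===== Notes on version B (the rewrite author's own statement) =====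
-- stated objective: faster
-- what changed: B keeps the wanted halfcycle numbers in a set and builds the result by direct 1-based indexing over the sorted in-range wanted positions, instead of A's list-with-membership-scan dedup plus a full scan of all m items each tested with 'i+1 in list'.
import Mathlib
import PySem

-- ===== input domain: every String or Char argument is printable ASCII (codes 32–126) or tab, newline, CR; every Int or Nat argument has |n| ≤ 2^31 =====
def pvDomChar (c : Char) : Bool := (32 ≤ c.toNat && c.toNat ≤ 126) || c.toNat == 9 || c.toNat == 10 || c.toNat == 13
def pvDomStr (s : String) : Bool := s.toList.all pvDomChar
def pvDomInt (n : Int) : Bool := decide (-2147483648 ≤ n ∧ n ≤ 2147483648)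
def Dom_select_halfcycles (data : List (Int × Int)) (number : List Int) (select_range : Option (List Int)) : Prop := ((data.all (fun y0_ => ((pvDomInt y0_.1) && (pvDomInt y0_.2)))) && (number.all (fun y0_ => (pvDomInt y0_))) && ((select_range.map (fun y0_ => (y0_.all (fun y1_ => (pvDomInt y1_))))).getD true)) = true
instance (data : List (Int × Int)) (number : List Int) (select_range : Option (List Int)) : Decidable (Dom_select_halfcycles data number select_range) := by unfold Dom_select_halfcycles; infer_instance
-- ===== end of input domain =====

-- B replaces A's list-dedup + full membership-scan selection by a set of wanted
-- numbers and direct 1-based indexing over the sorted in-range wanted positions.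

-- ===== PORT A =====
-- number is a list under the declared types, so the isinstance(int) branch never fires.
-- select_range is None or a tuple, so the isinstance(list) branch never fires; in the
-- tuple branch, select_range[0] / select_range[1] raise IndexError when the tuple has
-- fewer than 2 elements — those inputs are excluded by Pre_ (pyGetD is the total form).
def select_halfcycles (data : List (Int × Int)) (number : List Int) (select_range : Option (List Int)) : List (Int × Int) :=
  let selected : PySem.Dict Int Int := PySem.Dict.empty
  let halfcycles_to_catch : List Int :=
    number.foldl (fun acc num => if num ∈ acc then acc else acc ++ [num]) []
  let halfcycles_to_catch :=
    match select_range with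
    | none => halfcycles_to_catch
    | some sr =>
        (PySem.List.pyRange (PySem.List.pyGetD sr 0 0) (PySem.List.pyGetD sr 1 0 + 1) 1).foldl
          (fun acc num => if num ∈ acc then acc else acc ++ [num]) halfcycles_to_catch
  let selected :=
    (PySem.List.enumerate data).foldl
      (fun sel p => if (p.1 + 1) ∈ halfcycles_to_catch then sel.insert p.2.1 p.2.2 else sel)
      selected
  selected.items

-- ===== PORT B =====
-- same isinstance situation as A: only the None and tuple branches of Source B are reachable
def select_halfcycles_alt (data : List (Int × Int)) (number : List Int) (select_range : Option (List Int)) : List (Int × Int) :=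
  let catch_ : PySem.Set Int := PySem.Set.ofList number
  let catch_ :=
    match select_range with
    | none => catch_
    | some sr =>
        PySem.Set.update catch_
          (PySem.List.pyRange (PySem.List.pyGetD sr 0 0) (PySem.List.pyGetD sr 1 0 + 1) 1)
  let n : Int := data.length
  let wanted : List Int :=
    PySem.List.sorted (catch_.filter (fun i => decide (1 ≤ i) && decide (i ≤ n))) (fun x => x) false
  let d : PySem.Dict Int Int :=
    wanted.foldl
      (fun sel i =>
        let kv := PySem.List.pyGetD data (i - 1) (0, 0)  -- i ∈ [1, n], so items[i-1] never raises
        sel.insert kv.1 kv.2)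
      PySem.Dict.empty
  d.items

-- ===== PRECONDITION & SPEC =====
-- Pre_ excludes exactly the inputs where A raises: a select_range tuple with fewer than
-- 2 elements makes select_range[0] or select_range[1] raise IndexError.
def Pre_select_halfcycles (data : List (Int × Int)) (number : List Int) (select_range : Option (List Int)) : Prop :=
  2 ≤ ((select_range.map List.length).getD 2)
instance (data : List (Int × Int)) (number : List Int) (select_range : Option (List Int)) : Decidable (Pre_select_halfcycles data number select_range) := by unfold Pre_select_halfcycles; infer_instance

def pvWitness_select_halfcycles : (List (Int × Int)) × List Int × Option (List Int) :=
  ([(10, 1), (20, 2), (30, 3)], [1, 3, 3], some [2, 3])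

def Spec_select_halfcycles (data : List (Int × Int)) (number : List Int) (select_range : Option (List Int)) (out : List (Int × Int)) : Prop := out = select_halfcycles_alt data number select_range
instance (data : List (Int × Int)) (number : List Int) (select_range : Option (List Int)) (out : List (Int × Int)) : Decidable (Spec_select_halfcycles data number select_range out) := by unfold Spec_select_halfcycles; infer_instance

-- ===== CLAIM (what is proved, stated in full; the proofs are below) =====
def Claim_equal_select_halfcycles : Prop := ∀ (data : List (Int × Int)) (number : List Int) (select_range : Option (List Int)), Dom_select_halfcycles data number select_range → Pre_select_halfcycles data number select_range → Spec_select_halfcycles data number select_range (select_halfcycles data number select_range)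

-- ===== LEMMAS AND PROOFS =====

-- A's manual dedup loop is exactly set-update (first occurrences kept, in order).
theorem dedup_loop_eq_update (l : List Int) (s : PySem.Set Int) :
    l.foldl (fun acc num => if num ∈ acc then acc else acc ++ [num]) s =
      PySem.Set.update s l := by
  rw [PySem.Set.update]
  congr 1
  funext acc num
  rw [PySem.Set.add_eq_ite]

-- The positions A keeps, read off in order, are exactly B's sorted in-range wanted list.
theorem wanted_eq_filtered_enumerate (data : List (Int × Int)) (S : List Int) (hS : S.Nodup) :
    PySem.List.sorted (S.filter (fun i => decide (1 ≤ i) && decide (i ≤ (data.length : Int)))) (fun x => x) false =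
      ((PySem.List.enumerate data).filter (fun p => decide ((p.1 + 1) ∈ S))).map (fun p => p.1 + 1) := by
  have hpw : ((PySem.List.enumerate data).filter (fun p => decide ((p.1 + 1) ∈ S))).Pairwise
      (fun p q => p.1 < q.1) :=
    (PySem.List.pairwise_lt_enumerate data 0).filter _
  have hmaplt : (((PySem.List.enumerate data).filter (fun p => decide ((p.1 + 1) ∈ S))).map
      (fun p => p.1 + 1)).Pairwise (fun a b => a < b) :=
    List.pairwise_map.2 (hpw.imp (fun h => by omega))
  apply PySem.List.sorted_eq_of_perm_of_pairwise_lt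
  · -- permutation: both are nodup with the same membership
    refine (List.perm_ext_iff_of_nodup (hmaplt.imp (fun h => ne_of_lt h)) (hS.filter _)).2 ?_
    intro j
    simp only [List.mem_map, List.mem_filter, decide_eq_true_eq, Bool.and_eq_true,
      PySem.List.mem_enumerate_iff]
    constructor
    · rintro ⟨p, ⟨⟨k, hk, rfl⟩, hmem⟩, rfl⟩
      simp only [zero_add] at hmem ⊢
      exact ⟨hmem, by omega, by omega⟩
    · rintro ⟨hj, h1, hn⟩
      refine ⟨((j - 1).toNat, data[(j - 1).toNat]'(by omega)), ⟨⟨(j - 1).toNat, by omega, ?_⟩, ?_⟩, ?_⟩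
      · simp
      · simp only; rw [show ((((j - 1).toNat : Int)) + 1) = j by omega]; exact hj
      · simp only; omega
  · exact hmaplt

-- both selection phases, for any nodup list S of wanted numbers
theorem select_core (data : List (Int × Int)) (S : List Int) (hS : S.Nodup) :
    ((PySem.List.enumerate data).foldl
        (fun (sel : PySem.Dict Int Int) p => if (p.1 + 1) ∈ S then sel.insert p.2.1 p.2.2 else sel)
        PySem.Dict.empty).items =
      ((PySem.List.sorted (S.filter (fun i => decide (1 ≤ i) && decide (i ≤ (data.length : Int)))) (fun x => x) false).foldl
        (fun (sel : PySem.Dict Int Int) i =>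
          sel.insert (PySem.List.pyGetD data (i - 1) (0, 0)).1 (PySem.List.pyGetD data (i - 1) (0, 0)).2)
        PySem.Dict.empty).items := by
  have ha :
      (PySem.List.enumerate data).foldl
          (fun (sel : PySem.Dict Int Int) p => if (p.1 + 1) ∈ S then sel.insert p.2.1 p.2.2 else sel)
          PySem.Dict.empty =
        (((PySem.List.enumerate data).filter (fun p => decide ((p.1 + 1) ∈ S))).map (fun p => p.2)).foldl
          (fun (sel : PySem.Dict Int Int) kv => sel.insert kv.1 kv.2) PySem.Dict.empty := by
    rw [List.foldl_map, List.foldl_filter]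
    simp only [decide_eq_true_eq]
  rw [ha, wanted_eq_filtered_enumerate data S hS, List.foldl_map, List.foldl_map]
  -- the two insertion folds agree on every element of the filtered enumerate
  refine congrArg PySem.Dict.items (PySem.List.foldl_congr_mem _ _ _ _ ?_)
  intro acc p hp
  obtain ⟨k, hk, rfl⟩ := (PySem.List.mem_enumerate_iff data 0 p).1 (List.mem_filter.1 hp).1
  simp only [zero_add]
  rw [show ((k : Int) + 1 - 1) = (k : Int) by omega,
    PySem.List.pyGetD_eq_getElem data (0, 0) (by omega) (by exact_mod_cast hk)]
  simp

theorem select_halfcycles_eq (data : List (Int × Int)) (number : List Int)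
    (select_range : Option (List Int)) :
    select_halfcycles data number select_range = select_halfcycles_alt data number select_range := by
  unfold select_halfcycles select_halfcycles_alt
  cases select_range with
  | none =>
    dsimp only
    have hS : number.foldl (fun acc num => if num ∈ acc then acc else acc ++ [num]) [] =
        PySem.Set.ofList number := by
      rw [dedup_loop_eq_update, PySem.Set.update_nil_left]
    rw [← hS]
    exact select_core data _ (by rw [hS]; exact PySem.Set.nodup_ofList number)
  | some sr =>
    dsimp only
    have hS :
        (PySem.List.pyRange (PySem.List.pyGetD sr 0 0) (PySem.List.pyGetD sr 1 0 + 1) 1).foldl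
            (fun acc num => if num ∈ acc then acc else acc ++ [num])
            (number.foldl (fun acc num => if num ∈ acc then acc else acc ++ [num]) []) =
          PySem.Set.update (PySem.Set.ofList number)
            (PySem.List.pyRange (PySem.List.pyGetD sr 0 0) (PySem.List.pyGetD sr 1 0 + 1) 1) := by
      rw [dedup_loop_eq_update, dedup_loop_eq_update, PySem.Set.update_nil_left]
    rw [← hS]
    exact select_core data _
      (by rw [hS]; exact PySem.Set.nodup_update _ _ (PySem.Set.nodup_ofList number))

-- ===== VERDICT (by name: the statement is the Claim_ definition above) =====
theorem select_halfcycles_spec : Claim_equal_select_halfcycles := by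
  intro data number select_range _ _
  unfold Spec_select_halfcycles
  exact select_halfcycles_eq data number select_range
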